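-- pv_equiv track=rewrite | github.com/noant/spawn-cli | src/spawn_cli/core/low_level.py | _partition_gitignore
-- ===== SOURCE A (Python) =====
-- SPAWN_GITIGNORE_START = "# spawn:start"
--
-- SPAWN_GITIGNORE_END = "# spawn:end"
--
-- def _partition_gitignore(lines: list[str]) -> tuple[list[str], list[str], list[str]]:
--     start_idx: int | None = None
--     end_idx: int | None = None
--     for i, ln in enumerate(lines):
--         if ln.strip() == SPAWN_GITIGNORE_START:
--             start_idx = i
--             break
--     if start_idx is None:
--         return lines[:], [], []
--     for j in range(start_idx + 1, len(lines)):
--         if lines[j].strip() == SPAWN_GITIGNORE_END: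
--             end_idx = j
--             break
--     if end_idx is None:
--         return lines[:start_idx], lines[start_idx + 1 :], []
--     return lines[:start_idx], lines[start_idx + 1 : end_idx], lines[end_idx + 1 :]
-- ===== SOURCE B (Python) =====
-- SPAWN_GITIGNORE_START = "# spawn:start"
--
-- SPAWN_GITIGNORE_END = "# spawn:end"
--
-- def _partition_gitignore(lines: list[str]) -> tuple[list[str], list[str], list[str]]:
--     before: list[str] = []
--     between: list[str] = []
--     after: list[str] = []
--     mode = 0
--     for ln in lines:
--         if mode == 0 and ln.strip() == SPAWN_GITIGNORE_START:
--             mode = 1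
--         elif mode == 1 and ln.strip() == SPAWN_GITIGNORE_END:
--             mode = 2
--         else:
--             (before, between, after)[mode].append(ln)
--     return before, between, after
-- ===== Notes on version B (the rewrite author's own statement) =====
-- stated objective: simpler
-- what changed: Replaced the two index-search loops plus three slice expressions by a single pass with a mode variable (before/between/after) that appends each line to the list selected by the current mode, skipping the marker lines.
import Mathlib
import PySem

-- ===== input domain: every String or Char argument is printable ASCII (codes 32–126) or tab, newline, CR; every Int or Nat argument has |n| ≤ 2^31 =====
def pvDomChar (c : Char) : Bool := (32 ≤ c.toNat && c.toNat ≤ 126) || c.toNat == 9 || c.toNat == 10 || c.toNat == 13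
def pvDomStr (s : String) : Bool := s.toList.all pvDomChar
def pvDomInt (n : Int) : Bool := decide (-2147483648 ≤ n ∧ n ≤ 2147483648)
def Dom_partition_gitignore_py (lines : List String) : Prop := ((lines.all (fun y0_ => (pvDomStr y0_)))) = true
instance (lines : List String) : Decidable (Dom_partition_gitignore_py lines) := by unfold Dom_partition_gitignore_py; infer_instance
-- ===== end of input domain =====

-- B is a single mode-machine pass instead of A's two index searches plus slices; simpler, same cost.

-- ===== PORT A =====
-- A's first loop: 'for i, ln in enumerate(lines): if ln.strip() == START: start_idx = i; break'
-- ported as the obvious structural recursion returning the index of the first matching line.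
def pvFindStartA : List String → Option Nat
  | [] => none
  | h :: t =>
    if PySem.Str.strip h = "# spawn:start" then some 0
    else (pvFindStartA t).map (· + 1)

-- A's second loop: 'for j in range(start_idx+1, len(lines)): if lines[j].strip() == END: end_idx = j; break'
-- ported as the same scan over the suffix lines[start_idx+1:], returning the offset k (so end_idx = start_idx+1+k).
def pvFindEndA : List String → Option Nat
  | [] => none
  | h :: t =>
    if PySem.Str.strip h = "# spawn:end" then some 0
    else (pvFindEndA t).map (· + 1)

-- Slices lines[:i], lines[i+1:], lines[i+1:e], lines[e+1:] have nonnegative in-range indices here,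
-- where Python slicing is exactly List.take / List.drop.
def partition_gitignore_py (lines : List String) : List String × List String × List String :=
  match pvFindStartA lines with
  | none => (lines, [], [])
  | some i =>
    match pvFindEndA (lines.drop (i + 1)) with
    | none => (lines.take i, lines.drop (i + 1), [])
    | some k => (lines.take i, (lines.drop (i + 1)).take k, lines.drop (i + 1 + k + 1))

-- ===== PORT B =====
-- mode 2 of Source B: every remaining line is appended to `after`, one per iteration.
def pvAfterB : List String → List String
  | [] => []
  | h :: t => h :: pvAfterB t

-- mode 1 of Source B: append to `between` until the end marker, then mode 2.
def pvBetweenB : List String → List String × List String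
  | [] => ([], [])
  | h :: t =>
    if PySem.Str.strip h = "# spawn:end" then ([], pvAfterB t)
    else
      let r := pvBetweenB t
      (h :: r.1, r.2)

-- mode 0 of Source B: append to `before` until the start marker, then mode 1.
def partition_gitignore_py_alt (lines : List String) : List String × List String × List String :=
  match lines with
  | [] => ([], [], [])
  | h :: t =>
    if PySem.Str.strip h = "# spawn:start" then
      let r := pvBetweenB t
      ([], r.1, r.2)
    else
      let r := partition_gitignore_py_alt t
      (h :: r.1, r.2.1, r.2.2)

-- ===== PRECONDITION & SPEC =====
def Spec_partition_gitignore_py (lines : List String) (out : List String × List String × List String) : Prop := out = partition_gitignore_py_alt lines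
instance (lines : List String) (out : List String × List String × List String) : Decidable (Spec_partition_gitignore_py lines out) := by unfold Spec_partition_gitignore_py; infer_instance

-- ===== CLAIM (what is proved, stated in full; the proofs are below) =====
def Claim_equal_partition_gitignore_py : Prop := ∀ (lines : List String), Dom_partition_gitignore_py lines → Spec_partition_gitignore_py lines (partition_gitignore_py lines)

-- ===== LEMMAS AND PROOFS =====

theorem pvAfterB_eq (t : List String) : pvAfterB t = t := by
  induction t with
  | nil => rfl
  | cons h t ih => simp [pvAfterB, ih]

theorem pvBetweenB_eq (t : List String) :
    pvBetweenB t =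
      match pvFindEndA t with
      | none => (t, [])
      | some k => (t.take k, t.drop (k + 1)) := by
  induction t with
  | nil => rfl
  | cons h t ih =>
    by_cases hm : PySem.Str.strip h = "# spawn:end"
    · simp [pvBetweenB, pvFindEndA, hm, pvAfterB_eq]
    · simp only [pvBetweenB, pvFindEndA, hm, if_false, ih]
      cases hE : pvFindEndA t with
      | none => simp
      | some k => simp [List.take_succ_cons, List.drop_succ_cons]

theorem alt_eq (lines : List String) :
    partition_gitignore_py_alt lines = partition_gitignore_py lines := by
  induction lines with
  | nil => rfl
  | cons h t ih =>
    by_cases hs : PySem.Str.strip h = "# spawn:start"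
    · simp only [partition_gitignore_py_alt, hs, if_true, partition_gitignore_py,
        pvFindStartA, List.drop_succ_cons, List.drop_zero, List.take_zero,
        pvBetweenB_eq]
      cases hE : pvFindEndA t with
      | none => simp
      | some k => simp; omega
    · simp only [partition_gitignore_py_alt, hs, if_false, ih,
        partition_gitignore_py, pvFindStartA]
      cases hS : pvFindStartA t with
      | none => simp
      | some i =>
        simp only [Option.map_some, List.drop_succ_cons, List.take_succ_cons]
        cases hE : pvFindEndA (t.drop (i + 1)) with
        | none => simp
        | some k =>
          have harith : i + 1 + 1 + k = i + 1 + k + 1 := by omega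
          simp [harith]

-- ===== VERDICT (by name: the statement is the Claim_ definition above) =====
theorem partition_gitignore_py_spec : Claim_equal_partition_gitignore_py := by
  intro lines _
  exact (alt_eq lines).symm
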